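-- pv_equiv track=rewrite | github.com/JCZentrovia/RITDOCXMLConverter | tools/models/train_layout_classifier.py | get_field_name
-- ===== SOURCE A (Python) =====
-- import itertools
--
-- def _lower_keys(d):
--     return {k.lower(): k for k in d.keys()}
--
-- def autodetect_field(records, candidates):
--     """
--     Find the first candidate that appears (case-insensitively) in any record.
--     Returns the original-cased key, or None if not found.
--     """
--     for cand in candidates:
--         cand_l = cand.lower()
--         for r in records:
--             lk = _lower_keys(r)
--             if cand_l in lk:
--                 return lk[cand_l]
--     return None
--
-- def get_field_name(records, user_value, candidates, required=True, field_name=""):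
--     """
--     Decide which field to use: prefer user_value; otherwise, auto-detect from candidates.
--     """
--     if user_value:
--         return user_value
--     found = autodetect_field(records, candidates)
--     if not found and required:
--         # show available keys to help
--         all_keys = sorted(set(itertools.chain.from_iterable(r.keys() for r in records[:100])))
--         raise KeyError(
--             f"Could not find {field_name or 'required'} field. "
--             f"Tried {candidates}. Available keys include: {all_keys[:30]}"
--         )
--     return found
-- ===== SOURCE B (Python) =====
-- import itertools
--
-- def get_field_name(records, user_value, candidates, required=True, field_name=""):
--     """
--     Decide which field to use: prefer user_value; otherwise, auto-detect from candidates.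
--     Auto-detection: one overwrite-insert pass over the records in REVERSE order builds a
--     lowercase->original-key map (earlier records overwrite later ones, so the first record
--     wins; within a record later keys overwrite earlier ones, so the last key wins), then
--     the first candidate present in the map is picked with next().
--     """
--     if user_value:
--         return user_value
--     index = {}
--     for r in reversed(records):
--         for k in r.keys():
--             index[k.lower()] = k
--     found = next((index[c.lower()] for c in candidates if c.lower() in index), None)
--     if not found and required:
--         all_keys = sorted(set(itertools.chain.from_iterable(r.keys() for r in records[:100])))
--         raise KeyError(
--             f"Could not find {field_name or 'required'} field. "
--             f"Tried {candidates}. Available keys include: {all_keys[:30]}"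
--         )
--     return found
-- ===== Notes on version B (the rewrite author's own statement) =====
-- stated objective: alternative
-- what changed: Instead of re-scanning all records (rebuilding each record's lowercased-key map) for every candidate, B makes one overwrite-insert pass over the records in reverse order to build a single lowercase->original-key map (reversal makes the first record win, plain assignment makes the last key within a record win), then picks the first matching candidate with next() over a generator.
import Mathlib
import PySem

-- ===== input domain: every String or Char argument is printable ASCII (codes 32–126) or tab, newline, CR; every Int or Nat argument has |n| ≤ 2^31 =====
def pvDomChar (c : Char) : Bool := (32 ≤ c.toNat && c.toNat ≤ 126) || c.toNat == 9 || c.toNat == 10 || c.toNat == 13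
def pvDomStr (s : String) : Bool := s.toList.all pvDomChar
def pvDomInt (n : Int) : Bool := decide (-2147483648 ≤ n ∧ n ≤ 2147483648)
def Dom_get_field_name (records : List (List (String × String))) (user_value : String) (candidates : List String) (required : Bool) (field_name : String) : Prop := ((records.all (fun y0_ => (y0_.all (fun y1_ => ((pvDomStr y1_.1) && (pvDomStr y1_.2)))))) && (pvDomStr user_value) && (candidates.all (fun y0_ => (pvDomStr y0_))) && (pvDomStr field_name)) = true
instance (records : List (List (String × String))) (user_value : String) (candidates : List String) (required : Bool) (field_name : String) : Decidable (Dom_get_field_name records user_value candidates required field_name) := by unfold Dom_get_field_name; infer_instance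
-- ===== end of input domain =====

-- B replaces A's per-candidate rescan of all records by ONE overwrite-insert pass over the
-- records in REVERSE order (reversal makes the first record win, plain assignment makes the
-- last key in a record win), then picks the first matching candidate; same return values.

-- ===== PORT A =====
-- _lower_keys(d) = {k.lower(): k for k in d.keys()}  (a record arrives as a Python dict, so keys
-- are the first-occurrence-deduplicated keys of the association list: (Dict.ofList r).keys)
def lowerKeysA (r : List (String × String)) : PySem.Dict String String :=
  (PySem.Dict.ofList r).keys.foldl (fun acc k => acc.insert (PySem.Str.lower k) k) PySem.Dict.empty

-- inner 'for r in records' loop of autodetect_field, for a fixed cand_l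
def autodetectInnerA (cand_l : String) : List (List (String × String)) → Option String
  | [] => none
  | r :: rs =>
      match (lowerKeysA r).get? cand_l with
      | some v => some v
      | none => autodetectInnerA cand_l rs

-- outer 'for cand in candidates' loop of autodetect_field
def autodetectA (records : List (List (String × String))) : List String → Option String
  | [] => none
  | c :: cs =>
      match autodetectInnerA (PySem.Str.lower c) records with
      | some v => some v
      | none => autodetectA records cs

def get_field_name (records : List (List (String × String))) (user_value : String) (candidates : List String) (required : Bool) (field_name : String) : Option String :=
  if user_value ≠ "" then some user_value
  else
    let found := autodetectA records candidates
    -- 'if not found and required: raise KeyError(...)' — the raise is outside Pre_; none stands for it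
    if (found = none ∨ found = some "") ∧ required then none
    else found

-- ===== PORT B =====
-- index = {}; for r in reversed(records): for k in r.keys(): index[k.lower()] = k
def buildIndexB (records : List (List (String × String))) : PySem.Dict String String :=
  records.reverse.foldl
    (fun idx r => (PySem.Dict.ofList r).keys.foldl (fun i k => i.insert (PySem.Str.lower k) k) idx)
    PySem.Dict.empty

def get_field_name_alt (records : List (List (String × String))) (user_value : String) (candidates : List String) (required : Bool) (field_name : String) : Option String :=
  if user_value ≠ "" then some user_value
  else
    -- found = next((index[c.lower()] for c in candidates if c.lower() in index), None)
    let found := candidates.findSome? (fun c => (buildIndexB records).get? (PySem.Str.lower c))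
    -- 'if not found and required: raise KeyError(...)' — the raise is outside Pre_; none stands for it
    if (found = none ∨ found = some "") ∧ required then none
    else found

-- ===== PRECONDITION & SPEC =====
-- Pre_ excludes exactly the inputs where A raises KeyError: empty user_value, required, and no
-- candidate whose lowercased form matches a record key lowercased — or the first such matching
-- candidate is the empty string (then found == "" is falsy and A raises too).
def Pre_get_field_name (records : List (List (String × String))) (user_value : String) (candidates : List String) (required : Bool) (field_name : String) : Prop :=
  user_value ≠ "" ∨ required = false ∨
    (candidates.find? (fun c => records.any (fun r => r.any (fun kv => PySem.Str.lower kv.1 == PySem.Str.lower c))) ≠ none ∧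
     candidates.find? (fun c => records.any (fun r => r.any (fun kv => PySem.Str.lower kv.1 == PySem.Str.lower c))) ≠ some "")
instance (records : List (List (String × String))) (user_value : String) (candidates : List String) (required : Bool) (field_name : String) : Decidable (Pre_get_field_name records user_value candidates required field_name) := by unfold Pre_get_field_name; infer_instance

def pvWitness_get_field_name : (List (List (String × String))) × String × List String × Bool × String :=
  ([[("Page", "1"), ("x0", "2")]], "", ["page", "PAGE_NO"], true, "page")

def Spec_get_field_name (records : List (List (String × String))) (user_value : String) (candidates : List String) (required : Bool) (field_name : String) (out : Option String) : Prop := out = get_field_name_alt records user_value candidates required field_name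
instance (records : List (List (String × String))) (user_value : String) (candidates : List String) (required : Bool) (field_name : String) (out : Option String) : Decidable (Spec_get_field_name records user_value candidates required field_name out) := by unfold Spec_get_field_name; infer_instance

-- ===== CLAIM (what is proved, stated in full; the proofs are below) =====
def Claim_equal_get_field_name : Prop := ∀ (records : List (List (String × String))) (user_value : String) (candidates : List String) (required : Bool) (field_name : String), Dom_get_field_name records user_value candidates required field_name → Pre_get_field_name records user_value candidates required field_name → Spec_get_field_name records user_value candidates required field_name (get_field_name records user_value candidates required field_name)

-- ===== LEMMAS AND PROOFS =====

-- lookup after overwrite-inserting a list of lowered keys into idx: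
-- the LAST key of ks whose lowered form is k wins, else fall back to idx
lemma get?_foldl_insertLower (ks : List String) (idx : PySem.Dict String String) (k : String) :
    (ks.foldl (fun i k' => i.insert (PySem.Str.lower k') k') idx).get? k =
      match ks.reverse.find? (fun k' => PySem.Str.lower k' == k) with
      | some v => some v
      | none => idx.get? k := by
  induction ks generalizing idx with
  | nil => simp
  | cons a as ih =>
      simp only [List.foldl_cons, ih, List.reverse_cons, List.find?_append]
      cases h : as.reverse.find? (fun k' => PySem.Str.lower k' == k) with
      | some v => simp
      | none =>
          simp only [Option.orElse_eq_orElse, List.find?_cons, List.find?_nil]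
          by_cases hk : PySem.Str.lower a = k
          · subst hk; simp [PySem.Dict.get?_insert_self]
          · rw [PySem.Dict.get?_insert_of_ne idx a (fun he => hk he.symm)]
            have hb : (PySem.Str.lower a == k) = false := by simp [hk]
            simp [hb]

-- hence lookup in A's per-record lowered-key dict has the same characterisation
lemma get?_lowerKeysA (r : List (String × String)) (k : String) :
    (lowerKeysA r).get? k =
      ((PySem.Dict.ofList r).keys.reverse.find? (fun k' => PySem.Str.lower k' == k)) := by
  rw [lowerKeysA, get?_foldl_insertLower]
  cases h : (PySem.Dict.ofList r).keys.reverse.find? (fun k' => PySem.Str.lower k' == k) <;>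
    simp [PySem.Dict.get?_empty]

-- autodetect's inner record scan distributes over append (first half wins)
lemma autodetectInnerA_append (k : String) (xs ys : List (List (String × String))) :
    autodetectInnerA k (xs ++ ys) =
      match autodetectInnerA k xs with
      | some v => some v
      | none => autodetectInnerA k ys := by
  induction xs with
  | nil => simp [autodetectInnerA]
  | cons r rs ih =>
      simp only [List.cons_append, autodetectInnerA, ih]
      cases (lowerKeysA r).get? k <;> simp

-- lookup in B's reversed-overwrite index, relative to a starting idx
lemma get?_foldl_records (recs : List (List (String × String))) (idx : PySem.Dict String String) (k : String) :
    (recs.foldl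
      (fun idx r => (PySem.Dict.ofList r).keys.foldl (fun i k => i.insert (PySem.Str.lower k) k) idx)
      idx).get? k =
      match autodetectInnerA k recs.reverse with
      | some v => some v
      | none => idx.get? k := by
  induction recs generalizing idx with
  | nil => simp [autodetectInnerA]
  | cons r rs ih =>
      simp only [List.foldl_cons, ih, List.reverse_cons, autodetectInnerA_append]
      cases h : autodetectInnerA k rs.reverse with
      | some v => simp
      | none =>
          simp only [autodetectInnerA, get?_foldl_insertLower, ← get?_lowerKeysA]
          cases (lowerKeysA r).get? k <;> simp

-- the merged index answers exactly what A's inner scan answers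
lemma get?_buildIndexB (records : List (List (String × String))) (k : String) :
    (buildIndexB records).get? k = autodetectInnerA k records := by
  rw [buildIndexB, get?_foldl_records, List.reverse_reverse]
  cases autodetectInnerA k records <;> simp [PySem.Dict.get?_empty]

-- B's candidate pass equals A's outer loop
lemma findSome?_eq_autodetectA (records : List (List (String × String))) (candidates : List String) :
    candidates.findSome? (fun c => (buildIndexB records).get? (PySem.Str.lower c)) =
      autodetectA records candidates := by
  induction candidates with
  | nil => rfl
  | cons c cs ih =>
      simp only [List.findSome?_cons, get?_buildIndexB, autodetectA]
      cases autodetectInnerA (PySem.Str.lower c) records with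
      | some v => simp
      | none => simpa [get?_buildIndexB] using ih

theorem get_field_name_eq (records : List (List (String × String))) (user_value : String) (candidates : List String) (required : Bool) (field_name : String) :
    get_field_name records user_value candidates required field_name =
      get_field_name_alt records user_value candidates required field_name := by
  unfold get_field_name get_field_name_alt
  rw [findSome?_eq_autodetectA]

-- ===== VERDICT (by name: the statement is the Claim_ definition above) =====
theorem get_field_name_spec : Claim_equal_get_field_name := by
  intro records user_value candidates required field_name _ _
  unfold Spec_get_field_name
  exact get_field_name_eq records user_value candidates required field_name
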